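-- pv_equiv track=rewrite | github.com/riandyhasan/Smart-Education-TST | controllers.py | sort_by_akreditasi
-- ===== SOURCE A (Python) =====
-- def sort_by_akreditasi(list):
--   akre_a = []
--   akre_b = []
--   akre_ta = []
--   for l in list:
--     if l['akreditasi'] == 'A':
--       akre_a.append(l)
--     elif l['akreditasi'] == 'B':
--       akre_b.append(l)
--     else:
--       akre_ta.append(l)
--   return akre_a + akre_b + akre_ta
-- ===== SOURCE B (Python) =====
-- def sort_by_akreditasi(list):
--   return sorted(list, key=lambda l: {'A': 0, 'B': 1}.get(l['akreditasi'], 2))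
-- ===== Notes on version B (the rewrite author's own statement) =====
-- stated objective: idiomatic
-- what changed: Replaces the three-bucket partition loop with a single stable sort keyed by mapping 'A'->0, 'B'->1, anything else ->2; stability preserves within-group input order, so the result equals akre_a + akre_b + akre_ta.
import Mathlib
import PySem

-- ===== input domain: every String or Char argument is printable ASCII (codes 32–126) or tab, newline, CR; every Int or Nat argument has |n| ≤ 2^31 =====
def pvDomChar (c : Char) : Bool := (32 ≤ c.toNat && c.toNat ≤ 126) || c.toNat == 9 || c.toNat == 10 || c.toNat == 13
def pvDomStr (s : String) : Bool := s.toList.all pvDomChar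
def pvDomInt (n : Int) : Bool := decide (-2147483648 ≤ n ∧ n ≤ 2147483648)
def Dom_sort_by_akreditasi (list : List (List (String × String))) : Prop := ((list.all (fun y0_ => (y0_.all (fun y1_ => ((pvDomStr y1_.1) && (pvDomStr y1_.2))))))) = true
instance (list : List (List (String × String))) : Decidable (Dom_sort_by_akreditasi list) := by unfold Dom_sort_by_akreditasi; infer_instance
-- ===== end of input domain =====

-- B replaces A's three-bucket partition loop by one stable sort with key 'A'→0, 'B'→1, else 2 (idiomatic; same return value).

-- ===== PORT A =====
-- l['akreditasi'] : first-match association-list lookup (KeyError = none, excluded by Pre_)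
def akreGetA (l : List (String × String)) : Option String :=
  (l.find? (fun p => p.1 == "akreditasi")).map Prod.snd

def sort_by_akreditasi (list : List (List (String × String))) : List (List (String × String)) :=
  let st := list.foldl
    (fun (st : List (List (String × String)) × List (List (String × String)) × List (List (String × String))) l =>
      if akreGetA l = some "A" then (st.1 ++ [l], st.2.1, st.2.2)
      else if akreGetA l = some "B" then (st.1, st.2.1 ++ [l], st.2.2)
      else (st.1, st.2.1, st.2.2 ++ [l]))
    ([], [], [])
  st.1 ++ st.2.1 ++ st.2.2

-- ===== PORT B =====
-- the sort key: {'A': 0, 'B': 1}.get(l['akreditasi'], 2)  (lookup as in A; the .getD "" case is outside Pre_)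
def akreKeyB (l : List (String × String)) : Int :=
  (PySem.Dict.ofList [("A", (0 : Int)), ("B", 1)]).getD
    (((l.find? (fun p => p.1 == "akreditasi")).map Prod.snd).getD "") 2

def sort_by_akreditasi_alt (list : List (List (String × String))) : List (List (String × String)) :=
  PySem.List.sorted list akreKeyB

-- ===== PRECONDITION & SPEC =====
-- Pre_ excludes exactly the inputs where some record lacks the key "akreditasi": there Python A (and B) raise KeyError.
def Pre_sort_by_akreditasi (list : List (List (String × String))) : Prop :=
  ∀ l ∈ list, ∃ p ∈ l, p.1 = "akreditasi"
instance (list : List (List (String × String))) : Decidable (Pre_sort_by_akreditasi list) := by unfold Pre_sort_by_akreditasi; infer_instance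

def pvWitness_sort_by_akreditasi : (List (List (String × String))) :=
  [[("akreditasi", "B"), ("nama", "X")], [("akreditasi", "A")], [("akreditasi", "C")]]

def Spec_sort_by_akreditasi (list : List (List (String × String))) (out : List (List (String × String))) : Prop := out = sort_by_akreditasi_alt list
instance (list : List (List (String × String))) (out : List (List (String × String))) : Decidable (Spec_sort_by_akreditasi list out) := by unfold Spec_sort_by_akreditasi; infer_instance

-- ===== CLAIM (what is proved, stated in full; the proofs are below) =====
def Claim_equal_sort_by_akreditasi : Prop := ∀ (list : List (List (String × String))), Dom_sort_by_akreditasi list → Pre_sort_by_akreditasi list → Spec_sort_by_akreditasi list (sort_by_akreditasi list)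

-- ===== LEMMAS AND PROOFS =====

-- the key only takes the values 0, 1, 2, matching A's three branches
theorem akreKeyB_cases (l : List (String × String)) :
    akreKeyB l = (if akreGetA l = some "A" then 0 else if akreGetA l = some "B" then 1 else 2) := by
  unfold akreKeyB akreGetA
  cases h : (l.find? (fun p => p.1 == "akreditasi")).map Prod.snd with
  | none => simp; decide
  | some v =>
    simp only [Option.getD_some]
    by_cases hA : v = "A"
    · subst hA; simp; decide
    · by_cases hB : v = "B"
      · subst hB; simp; decide
      · have h1 : ("A" == v) = false := by simp [Ne.symm hA]
        have h2 : ("B" == v) = false := by simp [Ne.symm hB]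
        simp [PySem.Dict.ofList, PySem.Dict.getD, PySem.Dict.get?, PySem.Dict.update,
              PySem.Dict.empty, PySem.Dict.insert, PySem.Dict.contains, List.find?, h1, h2, hA, hB]

theorem insertBy_append_skip {α : Type} (before : α → α → Bool) (x : α) (ys zs : List α)
    (h : ∀ y ∈ ys, before x y = false) :
    PySem.List.insertBy before x (ys ++ zs) = ys ++ PySem.List.insertBy before x zs := by
  induction ys with
  | nil => rfl
  | cons y t ih =>
    have hy := h y (by simp)
    simp [PySem.List.insertBy, hy, ih (fun a ha => h a (by simp [ha]))]

theorem insertBy_front {α : Type} (before : α → α → Bool) (x : α) (ys : List α)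
    (h : ∀ y ∈ ys, before x y = true) :
    PySem.List.insertBy before x ys = x :: ys := by
  cases ys with
  | nil => rfl
  | cons y t => simp [PySem.List.insertBy, h y (by simp)]

-- loop invariant: folding insertions into a++b++c (keys 0 / 1 / 2) is A's three-bucket fold
theorem buckets_invariant (xs : List (List (String × String)))
    (a b c : List (List (String × String)))
    (ha : ∀ l ∈ a, akreKeyB l = 0) (hb : ∀ l ∈ b, akreKeyB l = 1) (hc : ∀ l ∈ c, akreKeyB l = 2) :
    xs.foldl (fun acc x => PySem.List.insertBy (fun p q => decide (akreKeyB p < akreKeyB q)) x acc) (a ++ b ++ c)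
    = (let st := xs.foldl
        (fun (st : List (List (String × String)) × List (List (String × String)) × List (List (String × String))) l =>
          if akreGetA l = some "A" then (st.1 ++ [l], st.2.1, st.2.2)
          else if akreGetA l = some "B" then (st.1, st.2.1 ++ [l], st.2.2)
          else (st.1, st.2.1, st.2.2 ++ [l]))
        (a, b, c)
       st.1 ++ st.2.1 ++ st.2.2) := by
  induction xs generalizing a b c with
  | nil => simp
  | cons x t ih =>
    have hk := akreKeyB_cases x
    by_cases h0 : akreGetA x = some "A"
    · have hkx : akreKeyB x = 0 := by rw [hk]; simp [h0]
      have step : PySem.List.insertBy (fun p q => decide (akreKeyB p < akreKeyB q)) x (a ++ b ++ c)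
          = (a ++ [x]) ++ b ++ c := by
        rw [List.append_assoc,
            insertBy_append_skip _ _ a (b ++ c) (by intro y hy; simp [hkx, ha y hy]),
            insertBy_front _ _ (b ++ c) (by
              intro y hy; rcases List.mem_append.mp hy with h | h
              · simp [hkx, hb y h]
              · simp [hkx, hc y h])]
        simp
      simp only [List.foldl_cons, h0, if_pos, step]
      exact ih (a ++ [x]) b c
        (by intro l hl; rcases List.mem_append.mp hl with h | h
            · exact ha l h
            · simp at h; subst h; exact hkx) hb hc
    · by_cases h1 : akreGetA x = some "B"
      · have hkx : akreKeyB x = 1 := by rw [hk]; simp [h1]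
        have step : PySem.List.insertBy (fun p q => decide (akreKeyB p < akreKeyB q)) x (a ++ b ++ c)
            = a ++ (b ++ [x]) ++ c := by
          rw [List.append_assoc,
              insertBy_append_skip _ _ a (b ++ c) (by intro y hy; simp [hkx, ha y hy]),
              insertBy_append_skip _ _ b c (by intro y hy; simp [hkx, hb y hy]),
              insertBy_front _ _ c (by intro y hy; simp [hkx, hc y hy])]
          simp
        simp only [List.foldl_cons, h1, if_pos, step]
        exact ih a (b ++ [x]) c ha
          (by intro l hl; rcases List.mem_append.mp hl with h | h
              · exact hb l h
              · simp at h; subst h; exact hkx) hc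
      · have hkx : akreKeyB x = 2 := by rw [hk]; simp [h0, h1]
        have step : PySem.List.insertBy (fun p q => decide (akreKeyB p < akreKeyB q)) x (a ++ b ++ c)
            = a ++ b ++ (c ++ [x]) := by
          rw [PySem.List.insertBy_of_forall_not_before _ _ _ (by
              intro y hy
              rcases List.mem_append.mp hy with h | h
              · rcases List.mem_append.mp h with h' | h'
                · simp [hkx, ha y h']
                · simp [hkx, hb y h']
              · simp [hkx, hc y h])]
          simp
        simp only [List.foldl_cons, h0, h1, step]
        exact ih a b (c ++ [x]) ha hb
          (by intro l hl; rcases List.mem_append.mp hl with h | h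
              · exact hc l h
              · simp at h; subst h; exact hkx)

-- ===== VERDICT (by name: the statement is the Claim_ definition above) =====
theorem sort_by_akreditasi_spec : Claim_equal_sort_by_akreditasi := by
  intro list _ _
  unfold Spec_sort_by_akreditasi sort_by_akreditasi sort_by_akreditasi_alt
  rw [PySem.List.sorted_eq_foldl_insertBy list akreKeyB]
  have h := buckets_invariant list [] [] [] (by simp) (by simp) (by simp)
  simp only [List.append_nil] at h
  exact h.symm
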